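-- pv_equiv track=rewrite | github.com/yale-nlp/Bright-Pro | agentic_retrieval/search_agent/answers_from_runs.py | cumulative_docids
-- ===== SOURCE A (Python) =====
-- from typing import Dict, List, Tuple
--
-- def cumulative_docids(round_to_docids: Dict[int, List[str]], upto: int) -> List[str]:
--     seen = set()
--     combined: List[str] = []
--     for r in range(1, upto + 1):
--         for d in round_to_docids.get(r, []):
--             if d not in seen:
--                 seen.add(d)
--                 combined.append(d)
--     return combined
-- ===== SOURCE B (Python) =====
-- from typing import Dict, List
--
-- def cumulative_docids(round_to_docids: Dict[int, List[str]], upto: int) -> List[str]: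
--     first_pos: Dict[str, int] = {}
--     pos = 0
--     for r in sorted(k for k in round_to_docids if 1 <= k <= upto):
--         for d in round_to_docids[r]:
--             first_pos.setdefault(d, pos)
--             pos += 1
--     return sorted(first_pos, key=first_pos.get)
-- ===== Notes on version B (the rewrite author's own statement) =====
-- stated objective: alternative
-- what changed: Instead of scanning every integer 1..upto with a seen-set and conditional append, B iterates only the rounds actually present in the dict (filtered to [1, upto] and sorted), records each docid's first global position with setdefault, and produces the output by sorting the docids by that recorded position.
import Mathlib
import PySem

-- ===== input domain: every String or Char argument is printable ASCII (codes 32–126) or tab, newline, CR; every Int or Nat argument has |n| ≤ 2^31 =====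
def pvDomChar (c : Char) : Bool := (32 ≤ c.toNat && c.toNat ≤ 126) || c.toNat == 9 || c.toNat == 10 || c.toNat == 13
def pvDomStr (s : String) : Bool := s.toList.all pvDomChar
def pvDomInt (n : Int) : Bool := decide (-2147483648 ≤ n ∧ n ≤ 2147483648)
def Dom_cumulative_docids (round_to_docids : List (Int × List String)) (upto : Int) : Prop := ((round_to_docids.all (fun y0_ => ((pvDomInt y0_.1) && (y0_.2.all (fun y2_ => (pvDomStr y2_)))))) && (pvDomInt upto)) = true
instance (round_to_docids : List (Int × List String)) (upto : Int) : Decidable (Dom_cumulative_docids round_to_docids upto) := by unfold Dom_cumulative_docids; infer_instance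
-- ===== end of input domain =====

-- B iterates only the rounds actually present in the dict (filtered to [1, upto] and sorted),
-- records each docid's first global position with setdefault, and produces the output by
-- sorting the docids by that position — no seen-set branch, no combined list, no scan of the
-- full range 1..upto (alternative decomposition; same return value).

-- ===== PORT A =====
-- seen set + combined list, built together while scanning range(1, upto+1)
def cumulative_docids (round_to_docids : List (Int × List String)) (upto : Int) : List String :=
  ((PySem.List.pyRange 1 (upto + 1) 1).foldl
      (fun (st : PySem.Set String × List String) r =>
        ((PySem.Dict.ofList round_to_docids).getD r []).foldl
          (fun st d =>
            if PySem.Set.contains st.1 d then st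
            else (PySem.Set.add st.1 d, st.2 ++ [d]))
          st)
      (PySem.Set.empty, [])).2

-- ===== PORT B =====
-- loop over sorted([k for k in dict if 1 <= k <= upto]); first_pos.setdefault(d, pos) with a
-- global position counter; finally sorted(first_pos, key=first_pos.get).
-- round_to_docids[r] is total because r is drawn from the dict's keys, so getD is exact;
-- first_pos.get is total on first_pos's keys, so getD k 0 is exact as the sort key.
def cumulative_docids_alt (round_to_docids : List (Int × List String)) (upto : Int) : List String :=
  let dct := PySem.Dict.ofList round_to_docids
  let st := (PySem.List.sorted (dct.keys.filter (fun k => decide (1 ≤ k) && decide (k ≤ upto)))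
      (fun x => x) false).foldl
    (fun (st : PySem.Dict String Int × Int) r =>
      (dct.getD r []).foldl
        (fun st d => (st.1.setdefault d st.2, st.2 + 1))
        st)
    (PySem.Dict.empty, 0)
  PySem.List.sorted st.1.keys (fun k => st.1.getD k 0) false

-- ===== PRECONDITION & SPEC =====
def Spec_cumulative_docids (round_to_docids : List (Int × List String)) (upto : Int) (out : List String) : Prop := out = cumulative_docids_alt round_to_docids upto
instance (round_to_docids : List (Int × List String)) (upto : Int) (out : List String) : Decidable (Spec_cumulative_docids round_to_docids upto out) := by unfold Spec_cumulative_docids; infer_instance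

-- ===== CLAIM (what is proved, stated in full; the proofs are below) =====
def Claim_equal_cumulative_docids : Prop := ∀ (round_to_docids : List (Int × List String)) (upto : Int), Dom_cumulative_docids round_to_docids upto → Spec_cumulative_docids round_to_docids upto (cumulative_docids round_to_docids upto)

-- ===== LEMMAS AND PROOFS =====

-- a fold of inner folds over g r is a fold over the flatMap
theorem pv_foldl_foldl_eq_foldl_flatMap {α β γ : Type} (l : List α) (g : α → List β)
    (f : γ → β → γ) (init : γ) :
    l.foldl (fun acc r => (g r).foldl f acc) init = (l.flatMap g).foldl f init := by
  induction l generalizing init with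
  | nil => rfl
  | cons x xs ih => simp [List.flatMap_cons, List.foldl_append, ih]

-- A's interleaved step keeps seen = combined, and folding it is Set.update
theorem pv_Astep_eq_update (xs : List String) (c : PySem.Set String) :
    xs.foldl
      (fun (st : PySem.Set String × List String) d =>
        if PySem.Set.contains st.1 d then st
        else (PySem.Set.add st.1 d, st.2 ++ [d]))
      (c, c)
    = (PySem.Set.update c xs, PySem.Set.update c xs) := by
  induction xs generalizing c with
  | nil => simp [PySem.Set.update]
  | cons x xs ih =>
    rw [PySem.Set.update_cons]
    by_cases hx : x ∈ c
    · have hc : PySem.Set.contains c x = true := (PySem.Set.contains_iff c x).mpr hx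
      rw [List.foldl_cons, if_pos hc, PySem.Set.add_of_mem hx]
      exact ih c
    · have hc : PySem.Set.contains c x = false := by
        cases h : PySem.Set.contains c x
        · rfl
        · exact absurd ((PySem.Set.contains_iff c x).mp h) hx
      rw [List.foldl_cons, if_neg (by simp only [hc]; exact Bool.false_ne_true),
          PySem.Set.add_of_not_mem hx]
      simpa using ih (c ++ [x])

-- a strictly increasing list whose elements lie in a strictly increasing list is a sublist of it
theorem pv_sublist_of_pairwise_lt : ∀ (l s : List Int), l.Pairwise (· < ·) → s.Pairwise (· < ·) →
    (∀ x ∈ s, x ∈ l) → s.Sublist l := by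
  intro l
  induction l with
  | nil =>
    intro s _ _ h
    cases s with
    | nil => exact List.Sublist.refl []
    | cons b s' => exact absurd (h b (List.mem_cons_self ..)) (List.not_mem_nil)
  | cons a l' ih =>
    intro s hl hs h
    cases s with
    | nil => exact List.nil_sublist _
    | cons b s' =>
      have hl' := (List.pairwise_cons.mp hl)
      have hs' := (List.pairwise_cons.mp hs)
      by_cases hba : b = a
      · subst hba
        refine List.Sublist.cons₂ b (ih s' hl'.2 hs'.2 ?_)
        intro x hx
        have hxl : x ∈ b :: l' := h x (List.mem_cons_of_mem b hx)
        rcases List.mem_cons.mp hxl with rfl | hx' 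
        · exact absurd (hs'.1 x hx) (lt_irrefl x)
        · exact hx'
      · have hbl' : b ∈ l' := by
          rcases List.mem_cons.mp (h b (List.mem_cons_self ..)) with rfl | hb'
          · exact absurd rfl hba
          · exact hb'
        refine List.Sublist.cons a (ih (b :: s') hl'.2 hs ?_)
        intro x hx
        rcases List.mem_cons.mp (h x hx) with rfl | hx'
        · -- x = a would give a < b ≤ x = a
          have hab : x < b := hl'.1 b hbl'
          rcases List.mem_cons.mp hx with rfl | hx''
          · exact absurd hab (lt_irrefl x)
          · exact absurd (lt_trans hab (hs'.1 x hx'')) (lt_irrefl x)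
        · exact hx'

-- dropping elements on which f vanishes does not change the flatMap (superlist Nodup)
theorem pv_flatMap_eq_of_sublist {α β : Type} (f : α → List β) :
    ∀ {s l : List α}, s.Sublist l → l.Nodup → (∀ x ∈ l, x ∉ s → f x = []) →
    l.flatMap f = s.flatMap f := by
  intro s l hsl
  induction hsl with
  | slnil => intro _ _; rfl
  | @cons s' l' a hsub ih =>
    intro hnd h
    have ha : a ∉ s' := fun hmem => (List.nodup_cons.mp hnd).1 (hsub.subset hmem)
    have hfa : f a = [] := h a (List.mem_cons_self ..) ha
    rw [List.flatMap_cons, hfa, List.nil_append]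
    exact ih (List.nodup_cons.mp hnd).2 (fun x hx hxn => h x (List.mem_cons_of_mem a hx) hxn)
  | @cons₂ s' l' a hsub ih =>
    intro hnd h
    rw [List.flatMap_cons, List.flatMap_cons]
    congr 1
    refine ih (List.nodup_cons.mp hnd).2 (fun x hx hxn => ?_)
    exact h x (List.mem_cons_of_mem a hx) (fun hc => hxn (by
      rcases List.mem_cons.mp hc with rfl | h' 
      · exact absurd hx (List.nodup_cons.mp hnd).1
      · exact h'))

-- the two flatMaps coincide: present rounds sorted = range 1..upto with the absent rounds dropped
theorem pv_flat_eq (round_to_docids : List (Int × List String)) (upto : Int) :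
    (PySem.List.pyRange 1 (upto + 1) 1).flatMap
        (fun r => (PySem.Dict.ofList round_to_docids).getD r [])
      = (PySem.List.sorted
            ((PySem.Dict.ofList round_to_docids).keys.filter
              (fun k => decide (1 ≤ k) && decide (k ≤ upto)))
            (fun x => x) false).flatMap
        (fun r => (PySem.Dict.ofList round_to_docids).getD r []) := by
  set dct := PySem.Dict.ofList round_to_docids with hdct
  set ks := PySem.List.sorted (dct.keys.filter (fun k => decide (1 ≤ k) && decide (k ≤ upto)))
      (fun x => x) false with hks
  have hperm : ks.Perm (dct.keys.filter (fun k => decide (1 ≤ k) && decide (k ≤ upto))) :=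
    PySem.List.sorted_perm ..
  have hmem : ∀ x, x ∈ ks ↔ x ∈ dct.keys ∧ 1 ≤ x ∧ x ≤ upto := by
    intro x
    rw [hperm.mem_iff, List.mem_filter]
    simp
  have h0 : dct.keys.Nodup := PySem.Dict.nodup_keys_ofList _
  have hnodup : ks.Nodup := hperm.symm.nodup (h0.filter _)
  have hkslt : ks.Pairwise (· < ·) := by
    have hle : ks.Pairwise (· ≤ ·) := by
      simpa using PySem.List.sorted_pairwise
        (dct.keys.filter (fun k => decide (1 ≤ k) && decide (k ≤ upto))) (fun x => x)
    exact (hle.and hnodup).imp (fun h => lt_of_le_of_ne h.1 h.2)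
  have hsub : ks.Sublist (PySem.List.pyRange 1 (upto + 1) 1) := by
    refine pv_sublist_of_pairwise_lt _ _ (PySem.List.pairwise_lt_pyRange_one ..) hkslt ?_
    intro x hx
    rw [PySem.List.mem_pyRange_one]
    have := (hmem x).mp hx
    omega
  refine pv_flatMap_eq_of_sublist _ hsub (PySem.List.nodup_pyRange_one ..) ?_
  intro x hxr hxk
  have hx1 : 1 ≤ x ∧ x < upto + 1 := (PySem.List.mem_pyRange_one).mp hxr
  have hnk : x ∉ dct.keys := by
    intro hk
    exact hxk ((hmem x).mpr ⟨hk, hx1.1, by omega⟩)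
  have hcf : dct.contains x = false := by
    cases hc : dct.contains x
    · rfl
    · exact absurd ((PySem.Dict.contains_iff_mem_keys ..).mp hc) hnk
  exact PySem.Dict.getD_of_not_contains _ _ hcf

-- B's accumulation: keys = first occurrences in order, values strictly increasing
theorem pv_setdefault_fold (xs : List String) :
    ∀ (d : PySem.Dict String Int) (p : Int), d.keys.Nodup →
      d.values.Pairwise (· < ·) → (∀ v ∈ d.values, v < p) →
      (xs.foldl (fun (st : PySem.Dict String Int × Int) x =>
          (st.1.setdefault x st.2, st.2 + 1)) (d, p)).1.keys = PySem.Set.update d.keys xs ∧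
      (xs.foldl (fun (st : PySem.Dict String Int × Int) x =>
          (st.1.setdefault x st.2, st.2 + 1)) (d, p)).1.keys.Nodup ∧
      (xs.foldl (fun (st : PySem.Dict String Int × Int) x =>
          (st.1.setdefault x st.2, st.2 + 1)) (d, p)).1.values.Pairwise (· < ·) := by
  induction xs with
  | nil => intro d p h1 h2 _; exact ⟨rfl, h1, h2⟩
  | cons x xs ih =>
    intro d p h1 h2 h3
    rw [List.foldl_cons, PySem.Set.update_cons]
    cases hc : d.contains x with
    | true =>
      have hx : x ∈ d.keys := (PySem.Dict.contains_iff_mem_keys ..).mp hc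
      rw [PySem.Dict.setdefault_of_contains _ _ hc, PySem.Set.add_of_mem hx]
      exact ih d (p + 1) h1 h2 (fun v hv => by have := h3 v hv; omega)
    | false =>
      have hx : x ∉ d.keys := fun hm => by
        simp [(PySem.Dict.contains_iff_mem_keys ..).mpr hm] at hc
      rw [PySem.Dict.setdefault_of_not_contains _ _ hc, PySem.Set.add_of_not_mem hx]
      have hkeys : (d.insert x p).keys = d.keys ++ [x] :=
        PySem.Dict.keys_insert_of_not_contains _ _ hc
      have hvals : (d.insert x p).values = d.values ++ [p] := by
        simp only [PySem.Dict.values, PySem.Dict.items_insert_of_not_contains _ _ hc,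
          List.map_append, List.map_cons, List.map_nil]
      have h1' : (d.insert x p).keys.Nodup := by
        rw [hkeys]; simp only [List.nodup_append, List.nodup_singleton, true_and]
        refine ⟨h1, fun a ha b hb hab => ?_⟩
        rw [List.mem_singleton] at hb
        subst hb; subst hab
        exact hx ha
      have h2' : (d.insert x p).values.Pairwise (· < ·) := by
        rw [hvals]
        exact List.pairwise_append.mpr ⟨h2, List.pairwise_singleton _ _,
          fun a ha b hb => by rw [List.mem_singleton] at hb; subst hb; exact h3 a ha⟩
      have h3' : ∀ v ∈ (d.insert x p).values, v < p + 1 := by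
        intro v hv
        rw [hvals] at hv
        rcases List.mem_append.mp hv with h | h
        · have := h3 v h; omega
        · rw [List.mem_singleton] at h; omega
      have hres := ih (d.insert x p) (p + 1) h1' h2' h3'
      rw [hkeys] at hres
      exact hres

-- ===== VERDICT (by name: the statement is the Claim_ definition above) =====
theorem cumulative_docids_spec : Claim_equal_cumulative_docids := by
  intro rtd upto _
  show cumulative_docids rtd upto = cumulative_docids_alt rtd upto
  simp only [cumulative_docids, cumulative_docids_alt]
  rw [pv_foldl_foldl_eq_foldl_flatMap, pv_foldl_foldl_eq_foldl_flatMap,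
      show (PySem.Set.empty, ([] : List String)) = (([] : List String), ([] : List String)) from rfl,
      pv_Astep_eq_update]
  obtain ⟨hkeys, hnodup, hmono⟩ := pv_setdefault_fold
    ((PySem.List.sorted ((PySem.Dict.ofList rtd).keys.filter
        (fun k => decide (1 ≤ k) && decide (k ≤ upto))) (fun x => x) false).flatMap
      (fun r => (PySem.Dict.ofList rtd).getD r []))
    PySem.Dict.empty 0
    (by rw [PySem.Dict.keys_empty]; exact List.nodup_nil)
    (by simp [PySem.Dict.values, PySem.Dict.empty])
    (by simp [PySem.Dict.values, PySem.Dict.empty])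
  rw [PySem.Dict.keys_empty] at hkeys
  have hpw := List.pairwise_map.mp
    (by rw [← PySem.Dict.values_eq_map_keys _ hnodup 0]; exact hmono)
  rw [PySem.List.sorted_eq_of_perm_of_pairwise_lt _ _ _ (List.Perm.refl _) hpw,
      hkeys, ← pv_flat_eq]
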